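-- pv_equiv track=rewrite | github.com/NithyaKrishnan08/LeetCode-HackerRank | DynamicProgramming/DP-Strings/MinOperationsToconvertStr1ToStr2.py | minInsertionsDeletions
-- ===== SOURCE A (Python) =====
-- def minInsertionsDeletions(s1: str, s2: str) -> int:
--   n1 = len(s1)
--   n2 = len(s2)
--
--   def longestCommonSubsequence(text1: str, text2: str) -> int:
--     n1 = len(text1)
--     n2 = len(text2)
--     dp = [[0 for _ in range(n2 + 1)] for _ in range(n1 + 1)]
--
--     for i1 in range(1, n1 + 1):
--       for i2 in range(1, n2 + 1):
--         if text1[i1 - 1] == text2[i2 - 1]: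
--           dp[i1][i2] = 1 + dp[i1 - 1][i2 - 1]
--         else:
--           dp[i1][i2] = max(dp[i1 - 1][i2], dp[i1][i2 - 1])
--
--     return dp[n1][n2]
--
--   lcs = longestCommonSubsequence(s1, s2)
--   deletions = n1 - lcs
--   insertions = n2 - lcs
--
--   # Total operations = No. of deletions + No. of insertions
--   return deletions + insertions
-- ===== SOURCE B (Python) =====
-- def minInsertionsDeletions(s1: str, s2: str) -> int:
--   # Direct insert/delete edit-distance DP on one rolling row; the inner
--   # scan walks zip(s2, prev, prev[1:]) instead of indexing a table.
--   prev = list(range(len(s2) + 1))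
--   i = 0
--   for c in s1:
--     i += 1
--     acc = [i]
--     last = i
--     for d, up_left, up in zip(s2, prev, prev[1:]):
--       v = up_left if c == d else 1 + min(up, last)
--       acc.append(v)
--       last = v
--     prev = acc
--   return prev[-1]
-- ===== Notes on version B (the rewrite author's own statement) =====
-- stated objective: alternative
-- what changed: Replaces the LCS-table-then-subtract computation with a direct insert/delete edit-distance DP kept as a single rolling row whose inner scan folds over zip(s2, prev, prev[1:]) (nonzero boundaries, min+1 recurrence instead of max), returning the distance itself.
import Mathlib
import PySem

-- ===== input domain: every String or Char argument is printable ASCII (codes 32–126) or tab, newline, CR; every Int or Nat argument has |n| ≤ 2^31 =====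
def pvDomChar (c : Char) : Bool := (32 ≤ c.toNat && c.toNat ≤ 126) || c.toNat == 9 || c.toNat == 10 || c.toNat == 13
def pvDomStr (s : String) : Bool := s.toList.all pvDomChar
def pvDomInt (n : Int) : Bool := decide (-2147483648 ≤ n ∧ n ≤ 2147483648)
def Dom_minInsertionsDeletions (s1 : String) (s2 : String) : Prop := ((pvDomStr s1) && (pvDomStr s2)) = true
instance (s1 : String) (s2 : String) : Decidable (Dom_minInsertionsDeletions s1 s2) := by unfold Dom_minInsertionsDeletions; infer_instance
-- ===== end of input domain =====

-- B replaces the LCS-then-subtract computation by a direct insert/delete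
-- edit-distance DP on one rolling row whose inner scan folds over a zip;
-- equivalence = the identity n1+n2-2*LCS.


-- ===== PORT A =====
-- inner loop of longestCommonSubsequence: given c = text1[i1-1], the remaining
-- chars of text2, the suffix of the previous dp row starting at the diagonal
-- cell, and the current row's last written value, produce the rest of the row.
def rowA (c : Char) : List Char → List Int → Int → List Int
  | d :: ds, q0 :: q1 :: qs, cur =>
      let v := if c = d then 1 + q0 else max q1 cur
      v :: rowA c ds (q1 :: qs) v
  | _, _, _ => []

def minInsertionsDeletions (s1 : String) (s2 : String) : Int :=
  let t2 := s2.toList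
  let n1 : Int := s1.toList.length
  let n2 : Int := t2.length
  -- dp row 0 is all zeros; each outer iteration writes a new row whose cell 0 is 0
  let row0 : List Int := List.replicate (t2.length + 1) 0
  let fin := s1.toList.foldl (fun prev c => 0 :: rowA c t2 prev 0) row0
  let lcs := fin.getLastD 0            -- dp[n1][n2]
  (n1 - lcs) + (n2 - lcs)              -- deletions + insertions

-- ===== PORT B =====
-- Source B: prev = range(n2+1); for each c of s1, scan zip(s2, prev, prev[1:])
-- with state (acc reversed via cons, last), appending diagonal on match,
-- else 1 + min; return prev[-1].
def stepB (c : Char) (acc : List Int × Int) (p : Char × (Int × Int)) : List Int × Int :=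
  let v := if c = p.1 then p.2.1 else 1 + min p.2.2 acc.2
  (v :: acc.1, v)

def outerB (t2 : List Char) (st : Int × List Int) (c : Char) : Int × List Int :=
  let i := st.1 + 1
  let prev := st.2
  let inner := (t2.zip (prev.zip (prev.drop 1))).foldl (stepB c) ([i], i)
  (i, inner.1.reverse)

def minInsertionsDeletions_alt (s1 : String) (s2 : String) : Int :=
  let t2 := s2.toList
  let prev0 : List Int := (List.range (t2.length + 1)).map Int.ofNat
  let fin := (s1.toList.foldl (outerB t2) (0, prev0)).2
  fin.getLastD 0                        -- prev[-1]

-- ===== PRECONDITION & SPEC =====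
def Spec_minInsertionsDeletions (s1 : String) (s2 : String) (out : Int) : Prop := out = minInsertionsDeletions_alt s1 s2
instance (s1 : String) (s2 : String) (out : Int) : Decidable (Spec_minInsertionsDeletions s1 s2 out) := by unfold Spec_minInsertionsDeletions; infer_instance

-- ===== CLAIM (what is proved, stated in full; the proofs are below) =====
def Claim_equal_minInsertionsDeletions : Prop := ∀ (s1 : String) (s2 : String), Dom_minInsertionsDeletions s1 s2 → Spec_minInsertionsDeletions s1 s2 (minInsertionsDeletions s1 s2)

-- ===== LEMMAS AND PROOFS =====

-- proof-side recursive description of B's inner zip-fold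
def rowB (c : Char) : List Char → List Int → Int → List Int
  | d :: ds, q0 :: q1 :: qs, cur =>
      let v := if c = d then q0 else 1 + min q1 cur
      v :: rowB c ds (q1 :: qs) v
  | _, _, _ => []

-- B's inner foldl over the zip accumulates exactly rowB, reversed
theorem inner_eq_rowB (c : Char) : ∀ (t2 : List Char) (prev : List Int) (cur : Int) (rev : List Int),
    ((t2.zip (prev.zip (prev.drop 1))).foldl (stepB c) (rev, cur)).1
      = (rowB c t2 prev cur).reverse ++ rev := by
  intro t2
  induction t2 with
  | nil => intro prev cur rev; simp [rowB]
  | cons d ds ih =>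
      intro prev cur rev
      match prev with
      | [] => simp [rowB]
      | [q0] => simp [rowB]
      | q0 :: q1 :: qs =>
          have h := ih (q1 :: qs) (if c = d then q0 else 1 + min q1 cur)
            ((if c = d then q0 else 1 + min q1 cur) :: rev)
          simp only [List.drop_succ_cons, List.drop_zero] at h
          simp only [List.drop_succ_cons, List.drop_zero, List.zip_cons_cons,
            List.foldl_cons, stepB]
          rw [h]
          simp [rowB, List.append_assoc]

-- the affine transform linking B's row i to A's row i: cell j ↦ i + j - 2 * cell
def tf (i : Int) : Int → List Int → List Int
  | _, [] => []
  | j, a :: as => (i + j - 2 * a) :: tf i (j + 1) as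

theorem tf_rep : ∀ (n : Nat) (j : Int), tf 0 j (List.replicate n 0) = (List.range n).map (fun (k : Nat) => j + (k : Int)) := by
  intro n
  induction n with
  | zero => intro j; simp [tf]
  | succ n ih =>
      intro j
      rw [List.replicate_succ, List.range_succ_eq_map, List.map_cons, List.map_map]
      simp only [tf]
      rw [ih (j + 1)]
      congr 1
      · push_cast; ring
      · apply List.map_congr_left
        intro k _
        simp only [Function.comp]
        push_cast
        ring

theorem rowB_tf (c : Char) : ∀ (t2 : List Char) (prevA : List Int) (curA i j : Int),
    rowB c t2 (tf i j prevA) (i + 1 + j - 2 * curA) = tf (i + 1) (j + 1) (rowA c t2 prevA curA) := by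
  intro t2
  induction t2 with
  | nil => intro prevA curA i j; cases prevA <;> simp [rowA, rowB, tf]
  | cons d ds ih =>
      intro prevA curA i j
      match prevA with
      | [] => simp [rowA, rowB, tf]
      | [q0] => simp [rowA, rowB, tf]
      | q0 :: q1 :: qs =>
          simp only [tf, rowA, rowB]
          by_cases h : c = d
          · subst h
            simp only [if_true]
            rw [List.cons_eq_cons]
            refine ⟨by ring, ?_⟩
            have hthis := ih (q1 :: qs) (1 + q0) i (j + 1)
            simp only [tf] at hthis
            have harg : i + 1 + (j + 1) - 2 * (1 + q0) = i + j - 2 * q0 := by ring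
            rw [harg] at hthis
            exact hthis
          · simp only [h, if_false]
            have hval : 1 + min (i + (j + 1) - 2 * q1) (i + 1 + j - 2 * curA)
                = i + 1 + (j + 1) - 2 * max q1 curA := by
              rcases le_total q1 curA with hle | hle
              · rw [max_eq_right hle, min_eq_right (by omega)]; ring
              · rw [max_eq_left hle, min_eq_left (by omega)]; ring
            rw [List.cons_eq_cons]
            refine ⟨hval, ?_⟩
            have hthis := ih (q1 :: qs) (max q1 curA) i (j + 1)
            simp only [tf] at hthis
            rw [hval]
            exact hthis

theorem fold_inv (t2 : List Char) : ∀ (l : List Char) (prevA : List Int) (i : Int),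
    l.foldl (outerB t2) (i, tf i 0 prevA)
      = (i + l.length, tf (i + l.length) 0 (l.foldl (fun prev c => 0 :: rowA c t2 prev 0) prevA)) := by
  intro l
  induction l with
  | nil => intro prevA i; simp
  | cons c cs ih =>
      intro prevA i
      simp only [List.foldl_cons, List.length_cons]
      have hout : outerB t2 (i, tf i 0 prevA) c = (i + 1, tf (i + 1) 0 (0 :: rowA c t2 prevA 0)) := by
        simp only [outerB]
        rw [inner_eq_rowB c t2 (tf i 0 prevA) (i + 1) [i + 1]]
        have hrow : rowB c t2 (tf i 0 prevA) (i + 1) = tf (i + 1) 1 (rowA c t2 prevA 0) := by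
          have := rowB_tf c t2 prevA 0 i 0
          simpa using this
        rw [hrow]
        simp [tf]
      rw [hout, ih (0 :: rowA c t2 prevA 0) (i + 1)]
      have hi : i + 1 + (cs.length : Int) = i + ((cs.length + 1 : Nat) : Int) := by push_cast; ring
      rw [hi]

theorem tf_getLastD : ∀ (l : List Int) (a i j : Int),
    (tf i j (a :: l)).getLastD 0 = i + j + (l.length : Int) - 2 * (a :: l).getLastD 0 := by
  intro l
  induction l with
  | nil => intro a i j; simp [tf]
  | cons b bs ih =>
      intro a i j
      have hstep : tf i j (a :: b :: bs) = (i + j - 2 * a) :: tf i (j + 1) (b :: bs) := by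
        simp [tf]
      rw [hstep]
      have htail : tf i (j + 1) (b :: bs) = (i + (j + 1) - 2 * b) :: tf i (j + 1 + 1) bs := by
        simp [tf]
      simp only [List.getLastD_cons]
      rw [htail]
      simp only [List.getLastD_cons]
      have hih := ih b i (j + 1)
      rw [htail] at hih
      simp only [List.getLastD_cons] at hih
      rw [hih]
      simp only [List.length_cons]
      push_cast
      ring

theorem rowA_length (c : Char) : ∀ (t2 : List Char) (prev : List Int) (cur : Int),
    prev.length = t2.length + 1 → (rowA c t2 prev cur).length = t2.length := by
  intro t2
  induction t2 with
  | nil => intro prev cur _; cases prev <;> simp [rowA]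
  | cons d ds ih =>
      intro prev cur hlen
      match prev, hlen with
      | q0 :: q1 :: qs, hlen =>
          simp only [rowA, List.length_cons]
          rw [ih (q1 :: qs) _ (by simpa using hlen)]

theorem foldA_length (t2 : List Char) : ∀ (l : List Char) (prev : List Int),
    prev.length = t2.length + 1 →
    (l.foldl (fun prev c => 0 :: rowA c t2 prev 0) prev).length = t2.length + 1 := by
  intro l
  induction l with
  | nil => intro prev h; simpa using h
  | cons c cs ih =>
      intro prev h
      simp only [List.foldl_cons]
      exact ih _ (by simp [rowA_length c t2 prev 0 h])

-- ===== VERDICT (by name: the statement is the Claim_ definition above) =====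
theorem minInsertionsDeletions_spec : Claim_equal_minInsertionsDeletions := by
  intro s1 s2 _
  unfold Spec_minInsertionsDeletions minInsertionsDeletions minInsertionsDeletions_alt
  dsimp only
  have hrow0 : (List.range (s2.toList.length + 1)).map Int.ofNat
      = tf 0 0 (List.replicate (s2.toList.length + 1) 0) := by
    rw [tf_rep]
    apply List.map_congr_left
    intro k _
    simp
  rw [hrow0, fold_inv]
  have hlen := foldA_length s2.toList s1.toList (List.replicate (s2.toList.length + 1) 0) (by simp)
  cases hfin : s1.toList.foldl (fun prev c => 0 :: rowA c s2.toList prev 0)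
      (List.replicate (s2.toList.length + 1) 0) with
  | nil => rw [hfin] at hlen; simp at hlen
  | cons a rest =>
      rw [hfin] at hlen
      simp only [List.length_cons] at hlen
      rw [tf_getLastD rest a _ 0]
      have hr : (rest.length : Int) = (s2.toList.length : Int) := by omega
      rw [hr]
      ring
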